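-- pv_equiv track=rewrite | github.com/loydp/Advent_of_Code | 2021/d5/d5.py | list_between_diagonals
-- ===== SOURCE A (Python) =====
-- def list_between_diagonals(loc):
--    '''takes a tuple of tuples representing two points
--    returns all locations between them in a line, inclusive'''
--
--    ret_list = []
--    # find num of increase/decrease between points
--    raw_range_x = loc[0][0] - loc[1][0]
--    raw_range_y = loc[0][1] - loc[1][1]
--
--    # establish up/down, range
--    x_increment = 1 if raw_range_x < 0 else -1
--    y_increment = 1 if raw_range_y < 0 else -1
--    final_range = abs(raw_range_x) + 1
--
--    # enact
--    for i in range(final_range):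
--       x = loc[0][0] + (i * x_increment)
--       y = loc[0][1] + (i * y_increment)
--       ret_list.append((x, y))
--
--    return ret_list
-- ===== SOURCE B (Python) =====
-- def list_between_diagonals(loc):
--     '''takes a tuple of tuples representing two points
--     returns all locations between them in a line, inclusive'''
--     (x0, y0), (x1, y1) = loc
--     sx = 1 if x0 < x1 else -1
--     sy = 1 if y0 < y1 else -1
--
--     def seg(x, y, m):
--         # the m+1 points of the walk starting at (x, y), by midpoint bisection
--         if m == 0:
--             return [(x, y)]
--         h = m // 2
--         return seg(x, y, h) + seg(x + (h + 1) * sx, y + (h + 1) * sy, m - h - 1)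
--
--     return seg(x0, y0, abs(x0 - x1))
-- ===== Notes on version B (the rewrite author's own statement) =====
-- stated objective: alternative
-- what changed: B replaces A's counted index loop (unit-stepping coordinates off a loop counter) by divide-and-conquer: it bisects the segment at its midpoint and recursively concatenates the two halves, with O(log n) recursion depth and no stepping loop.
import Mathlib
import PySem

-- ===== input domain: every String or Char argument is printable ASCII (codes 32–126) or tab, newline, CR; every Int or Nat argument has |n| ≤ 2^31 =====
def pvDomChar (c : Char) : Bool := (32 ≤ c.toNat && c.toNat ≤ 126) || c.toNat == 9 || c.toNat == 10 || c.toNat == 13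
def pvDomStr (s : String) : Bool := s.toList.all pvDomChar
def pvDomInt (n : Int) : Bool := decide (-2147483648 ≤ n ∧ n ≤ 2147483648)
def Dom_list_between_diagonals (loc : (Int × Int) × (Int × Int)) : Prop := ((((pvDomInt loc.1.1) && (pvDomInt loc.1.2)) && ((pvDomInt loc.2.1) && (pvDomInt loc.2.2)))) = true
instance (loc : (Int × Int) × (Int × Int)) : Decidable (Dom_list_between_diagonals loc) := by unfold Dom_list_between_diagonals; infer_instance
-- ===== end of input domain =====

-- B builds the line by divide-and-conquer midpoint bisection instead of A's counted unit-stepping loop (alternative decomposition; same cost).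
-- ===== PORT A =====
def list_between_diagonals (loc : (Int × Int) × (Int × Int)) : List (Int × Int) :=
  let raw_range_x := loc.1.1 - loc.2.1
  let raw_range_y := loc.1.2 - loc.2.2
  let x_increment : Int := if raw_range_x < 0 then 1 else -1
  let y_increment : Int := if raw_range_y < 0 then 1 else -1
  let final_range := |raw_range_x| + 1
  (PySem.List.pyRange 0 final_range 1).foldl
    (fun ret_list i => ret_list ++ [(loc.1.1 + i * x_increment, loc.1.2 + i * y_increment)]) []

-- ===== PORT B =====
-- Python's `m` is a nonnegative int; ported as Nat (so `m // 2` is Nat division, exact on ≥ 0).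
def segWalk (sx sy : Int) (x y : Int) (m : Nat) : List (Int × Int) :=
  if m = 0 then [(x, y)]
  else
    let h := m / 2
    segWalk sx sy x y h ++ segWalk sx sy (x + (h + 1) * sx) (y + (h + 1) * sy) (m - h - 1)
termination_by m
decreasing_by all_goals omega

def list_between_diagonals_alt (loc : (Int × Int) × (Int × Int)) : List (Int × Int) :=
  let x0 := loc.1.1; let y0 := loc.1.2; let x1 := loc.2.1; let y1 := loc.2.2
  let sx : Int := if x0 < x1 then 1 else -1
  let sy : Int := if y0 < y1 then 1 else -1
  segWalk sx sy x0 y0 (x0 - x1).natAbs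

-- ===== PRECONDITION & SPEC =====
def Spec_list_between_diagonals (loc : (Int × Int) × (Int × Int)) (out : List (Int × Int)) : Prop := out = list_between_diagonals_alt loc
instance (loc : (Int × Int) × (Int × Int)) (out : List (Int × Int)) : Decidable (Spec_list_between_diagonals loc out) := by unfold Spec_list_between_diagonals; infer_instance

-- ===== CLAIM =====
def Claim_equal_list_between_diagonals : Prop := ∀ (loc : (Int × Int) × (Int × Int)), Dom_list_between_diagonals loc → Spec_list_between_diagonals loc (list_between_diagonals loc)

-- ===== LEMMAS AND PROOFS =====

theorem foldl_append_singleton {α β : Type} (f : α → β) :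
    ∀ (l : List α) (init : List β),
      l.foldl (fun acc i => acc ++ [f i]) init = init ++ l.map f := by
  intro l
  induction l with
  | nil => simp
  | cons a t ih => intro init; simp [List.foldl, ih]

theorem segWalk_eq (sx sy : Int) :
    ∀ (m : Nat) (x y : Int),
      segWalk sx sy x y m = (List.range (m + 1)).map (fun (k : Nat) => (x + k * sx, y + k * sy)) := by
  intro m
  induction m using Nat.strong_induction_on with
  | _ m ih =>
    intro x y
    rw [segWalk]
    by_cases hm : m = 0
    · simp [hm]
    · simp only [hm, if_false]
      have h1 : m / 2 < m := Nat.div_lt_self (Nat.pos_of_ne_zero hm) (by norm_num)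
      have h2 : m - m / 2 - 1 < m := by omega
      rw [ih _ h1, ih _ h2]
      have hr : List.range (m + 1)
          = List.range (m / 2 + 1) ++ (List.range (m - m / 2 - 1 + 1)).map (fun k => m / 2 + 1 + k) := by
        conv_lhs => rw [show m + 1 = (m / 2 + 1) + (m - m / 2 - 1 + 1) by omega]
        rw [List.range_add]
      rw [hr, List.map_append, List.map_map]
      congr 1
      refine List.map_congr_left (fun k _ => ?_)
      simp only [Function.comp_apply, Prod.mk.injEq]
      constructor <;> push_cast <;> ring

-- ===== VERDICT =====
theorem list_between_diagonals_spec : Claim_equal_list_between_diagonals := by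
  intro loc _
  unfold Spec_list_between_diagonals list_between_diagonals list_between_diagonals_alt
  obtain ⟨⟨x0, y0⟩, x1, y1⟩ := loc
  simp only
  have hx : (if x0 - x1 < 0 then (1:Int) else -1) = (if x0 < x1 then 1 else -1) := by
    split_ifs with h1 h2 h3 <;> omega
  have hy : (if y0 - y1 < 0 then (1:Int) else -1) = (if y0 < y1 then 1 else -1) := by
    split_ifs with h1 h2 h3 <;> omega
  rw [hx, hy, foldl_append_singleton, List.nil_append, segWalk_eq]
  have hN : |x0 - x1| + 1 = ((x0 - x1).natAbs + 1 : Nat) := by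
    push_cast
    rw [Int.abs_eq_natAbs]
  rw [hN, PySem.List.pyRange_one, show (((((x0 - x1).natAbs + 1 : Nat)) : Int) - 0).toNat = (x0 - x1).natAbs + 1 by omega]
  rw [List.map_map]
  refine List.map_congr_left (fun k _ => ?_)
  simp
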